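-- pv_equiv track=rewrite | github.com/soo5717/2021-Algorithm-Study | Programmers/suyeon/2020_kakao_blind/괄호 변환.py | convert
-- ===== SOURCE A (Python) =====
-- def separate(p): # 문자열 u, v로 분리
--     u, v = '', ''
--     count = 0
--     for i, pp in enumerate(p):
--         count += 1 if pp == '(' else -1
--         if count == 0:
--             u, v = p[:i+1], p[i+1:]
--             break
--     return u, v
--
-- def is_correct(p): # 올바른 괄호 문자열인지 판단
--     stack = []
--     for pp in p:
--         if pp == '(':
--             stack.append('(')
--         elif stack:
--             stack.pop()
--     return True if not stack else False
--
-- def convert(p):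
--     if not p: return p # 1단계
--     u, v = separate(p) # 2단계
--
--     if is_correct(u): # 3단계
--         return u + convert(v)
--     else: # 4단계
--         u = ''.join([')' if uu == '(' else '(' for uu in u[1:-1]])
--         return '(' + convert(v) + ')' + u
-- ===== SOURCE B (Python) =====
-- def convert(p):
--     # One pass: split p into its successive minimal balanced segments
--     # (a trailing part whose count never returns to zero is dropped, like A).
--     segs = []
--     start = 0
--     count = 0
--     for i, c in enumerate(p):
--         count += 1 if c == '(' else -1
--         if count == 0:
--             segs.append(p[start:i + 1])
--             start = i + 1
--     # Fold the segments from right to left into the answer.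
--     acc = ''
--     for seg in reversed(segs):
--         if seg[0] == '(':
--             acc = seg + acc
--         else:
--             acc = '(' + acc + ')' + ''.join(')' if ch == '(' else '(' for ch in seg[1:-1])
--     return acc
-- ===== Notes on version B (the rewrite author's own statement) =====
-- stated objective: alternative
-- what changed: Replaces A's recursive separate/is_correct decomposition by a single left-to-right pass that splits p into its minimal balanced segments (dropping an unbalanced tail) followed by a right-to-left fold over the segment list, with is_correct replaced by a first-character test on each minimal segment.
import Mathlib
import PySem

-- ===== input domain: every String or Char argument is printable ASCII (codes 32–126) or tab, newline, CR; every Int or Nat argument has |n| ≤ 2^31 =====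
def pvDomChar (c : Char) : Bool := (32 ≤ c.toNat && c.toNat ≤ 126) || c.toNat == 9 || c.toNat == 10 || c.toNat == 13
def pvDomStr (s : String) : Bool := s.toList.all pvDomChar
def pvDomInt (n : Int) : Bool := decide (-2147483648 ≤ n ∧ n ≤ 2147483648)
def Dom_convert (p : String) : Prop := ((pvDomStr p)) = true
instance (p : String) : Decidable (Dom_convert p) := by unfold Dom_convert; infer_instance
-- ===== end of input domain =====

-- B replaces A's recursive separate/is_correct decomposition by one segment-splitting pass
-- plus a right-to-left fold over the segments (objective: alternative decomposition).

-- ===== PORT A =====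
def pvCntStep (c : Char) : Int := if c = '(' then 1 else -1

-- loop of separate: count, accumulated prefix p[:i+1], remaining chars; break when count = 0
def sepAux : Int → List Char → List Char → List Char × List Char
  | _, _, [] => ([], [])
  | count, acc, c :: rest =>
    let count' := count + pvCntStep c
    if count' = 0 then (acc ++ [c], rest) else sepAux count' (acc ++ [c]) rest

def separate (p : List Char) : List Char × List Char := sepAux 0 [] p

-- loop of is_correct: the stack
def isCorrectAux : List Char → List Char → List Char
  | stack, [] => stack
  | stack, c :: rest =>
    if c = '(' then isCorrectAux ('(' :: stack) rest
    else
      match stack with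
      | [] => isCorrectAux [] rest
      | _ :: s => isCorrectAux s rest

def isCorrect (p : List Char) : Bool := (isCorrectAux [] p).isEmpty

-- termination lemma for convert's recursion on v (the port cites it in decreasing_by)
theorem sepAux_snd_lt : ∀ (p : List Char) (count : Int) (acc : List Char), p ≠ [] →
    (sepAux count acc p).2.length < p.length := by
  intro p
  induction p with
  | nil => intro _ _ h; exact absurd rfl h
  | cons c rest ih =>
    intro count acc _
    simp only [sepAux]
    split
    · simp
    · rcases rest with _ | ⟨d, rest'⟩
      · simp [sepAux]
      · exact Nat.lt_trans (ih _ _ (by simp)) (by simp)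

def convertList (p : List Char) : List Char :=
  if _h : p = [] then p
  else
    let uv := separate p
    if isCorrect uv.1 then uv.1 ++ convertList uv.2
    else '(' :: convertList uv.2 ++ ')' ::
      (PySem.List.slice uv.1 (some 1) (some (-1))).map (fun c => if c = '(' then ')' else '(')
  termination_by p.length
  decreasing_by all_goals exact sepAux_snd_lt p 0 [] _h

def convert (p : String) : String := String.ofList (convertList p.toList)

-- ===== PORT B =====
-- one pass splitting p into minimal balanced segments (unbalanced tail dropped)
def segsAux : Int → List Char → List Char → List (List Char)
  | _, _, [] => []
  | count, cur, c :: rest =>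
    let count' := count + (if c = '(' then (1:Int) else -1)
    if count' = 0 then (cur ++ [c]) :: segsAux 0 [] rest
    else segsAux count' (cur ++ [c]) rest

-- body of B's fold over reversed(segs)
def segStep (acc seg : List Char) : List Char :=
  if seg.head? = some '(' then seg ++ acc
  else '(' :: acc ++ ')' ::
    (PySem.List.slice seg (some 1) (some (-1))).map (fun c => if c = '(' then ')' else '(')

def convert_alt (p : String) : String :=
  String.ofList ((segsAux 0 [] p.toList).reverse.foldl segStep [])

-- ===== PRECONDITION & SPEC =====
def Spec_convert (p : String) (out : String) : Prop := out = convert_alt p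
instance (p : String) (out : String) : Decidable (Spec_convert p out) := by unfold Spec_convert; infer_instance

-- ===== CLAIM (what is proved, stated in full; the proofs are below) =====
def Claim_equal_convert : Prop := ∀ (p : String), Dom_convert p → Spec_convert p (convert p)

-- ===== LEMMAS AND PROOFS =====

-- signed parenthesis count of a list
def cnt (l : List Char) : Int := (l.map pvCntStep).sum

theorem cnt_nil : cnt [] = 0 := rfl
theorem cnt_cons (c : Char) (l : List Char) : cnt (c :: l) = pvCntStep c + cnt l := by
  simp [cnt]

-- segsAux agrees with sepAux: same break point, then recurse on the rest
theorem segs_sep : ∀ (p : List Char) (count : Int) (acc : List Char),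
    (sepAux count acc p = ([], []) ∧ segsAux count acc p = []) ∨
    (∃ u v, sepAux count acc p = (u, v) ∧ u ≠ [] ∧
      segsAux count acc p = u :: segsAux 0 [] v) := by
  intro p
  induction p with
  | nil => intro count acc; left; exact ⟨rfl, rfl⟩
  | cons c rest ih =>
    intro count acc
    simp only [sepAux, segsAux, pvCntStep]
    split <;> split
    · right; exact ⟨acc ++ [c], rest, rfl, by simp, rfl⟩
    · exact ih _ _
    · right; exact ⟨acc ++ [c], rest, rfl, by simp, rfl⟩
    · exact ih _ _

-- the segment returned by a break is acc ++ w where w is "minimal balanced" relative to count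
theorem sepAux_shape : ∀ (p : List Char) (count : Int) (acc u v : List Char),
    sepAux count acc p = (u, v) → u ≠ [] →
    ∃ w, u = acc ++ w ∧ w ≠ [] ∧ count + cnt w = 0 ∧
      (∀ q, q <+: w → q ≠ [] → q ≠ w → count + cnt q ≠ 0) := by
  intro p
  induction p with
  | nil => intro count acc u v h hne; simp [sepAux] at h; simp [h.1] at hne
  | cons c rest ih =>
    intro count acc u v h hne
    simp only [sepAux] at h
    split at h
    · rename_i h0
      simp only [Prod.mk.injEq] at h
      obtain ⟨hu, hv⟩ := h
      refine ⟨[c], by simp [hu.symm], by simp, by simpa [cnt_cons, cnt_nil] using h0, ?_⟩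
      intro q hq hqne hqnw
      rcases q with _ | ⟨d, q'⟩
      · exact absurd rfl hqne
      · obtain ⟨rfl, hq'⟩ := List.cons_prefix_cons.mp hq
        rw [List.prefix_nil.mp hq'] at hqnw
        exact absurd rfl hqnw
    · rename_i h0
      obtain ⟨w', hw1, hw2, hw3, hw4⟩ := ih _ _ _ _ h hne
      refine ⟨c :: w', by simpa using hw1, by simp, ?_, ?_⟩
      · rw [cnt_cons]; omega
      · intro q hq hqne hqnw
        rcases q with _ | ⟨d, q'⟩
        · exact absurd rfl hqne
        · obtain ⟨rfl, hq'⟩ := List.cons_prefix_cons.mp hq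
          rcases eq_or_ne q' [] with rfl | hq2
          · rw [cnt_cons, cnt_nil]; omega
          · rcases eq_or_ne q' w' with rfl | hne'
            · exact absurd rfl hqnw
            · have := hw4 q' hq' hq2 hne'
              rw [cnt_cons]; omega

-- discrete IVT: positive start, no proper prefix hits 0 ⇒ all prefixes ≥ 0
theorem prefix_nonneg : ∀ (t : List Char) (n : Int), 0 < n →
    (∀ q, q <+: t → q ≠ t → n + cnt q ≠ 0) →
    (∀ q, q <+: t → 0 ≤ n + cnt q) := by
  intro t
  induction t with
  | nil =>
    intro n hn _ q hq
    rw [List.prefix_nil.mp hq, cnt_nil]; omega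
  | cons c t' ih =>
    intro n hn hno q hq
    rcases q with _ | ⟨d, q'⟩
    · rw [cnt_nil]; omega
    · obtain ⟨hd, hq'⟩ := List.cons_prefix_cons.mp hq
      subst d
      rw [cnt_cons]
      have hstep : pvCntStep c = 1 ∨ pvCntStep c = -1 := by
        unfold pvCntStep; split <;> simp
      rcases t' with _ | ⟨e, t''⟩
      · rw [List.prefix_nil.mp hq', cnt_nil]; omega
      · have hpos : 0 < n + pvCntStep c := by
          have := hno [c] ⟨e :: t'', rfl⟩ (by simp)
          rw [cnt_cons, cnt_nil] at this
          omega
        have := ih (n + pvCntStep c) hpos (by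
          intro r hr hrne
          have := hno (c :: r) (by simpa using hr) (by simpa using hrne)
          rw [cnt_cons] at this; omega) q' hq'
        omega

-- stack length after the run, exact, when no prefix underflows
theorem run_len_eq : ∀ (l stack : List Char),
    (∀ q, q <+: l → 0 ≤ (stack.length : Int) + cnt q) →
    ((isCorrectAux stack l).length : Int) = stack.length + cnt l := by
  intro l
  induction l with
  | nil => intro stack _; simp [isCorrectAux, cnt_nil]
  | cons c rest ih =>
    intro stack hpre
    simp only [isCorrectAux]
    split
    · rename_i hc
      have := ih ('(' :: stack) (by
        intro q hq
        have := hpre (c :: q) (by simpa using hq)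
        rw [cnt_cons] at this
        simp only [List.length_cons]
        push_cast
        simp [pvCntStep, hc] at this ⊢
        omega)
      rw [this, cnt_cons]
      simp [pvCntStep, hc]
      omega
    · rename_i hc
      have hlen : 1 ≤ stack.length := by
        have := hpre [c] ⟨rest, rfl⟩
        rw [cnt_cons, cnt_nil] at this
        simp [pvCntStep, hc] at this
        omega
      rcases stack with _ | ⟨s, stack'⟩
      · simp at hlen
      · have := ih stack' (by
          intro q hq
          have := hpre (c :: q) (by simpa using hq)
          rw [cnt_cons] at this
          simp [pvCntStep, hc] at this ⊢
          omega)
        rw [this, cnt_cons]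
        simp [pvCntStep, hc]

-- lower bound always (underflowing pops only help)
theorem run_len_ge : ∀ (l stack : List Char),
    (stack.length : Int) + cnt l ≤ ((isCorrectAux stack l).length : Int) := by
  intro l
  induction l with
  | nil => intro stack; simp [isCorrectAux, cnt_nil]
  | cons c rest ih =>
    intro stack
    simp only [isCorrectAux]
    split
    · rename_i hc
      have := ih ('(' :: stack)
      rw [cnt_cons]
      simp [pvCntStep, hc] at this ⊢
      omega
    · rename_i hc
      rcases stack with _ | ⟨s, stack'⟩
      · have := ih []
        rw [cnt_cons]
        simp [pvCntStep, hc] at this ⊢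
        omega
      · have := ih stack'
        rw [cnt_cons]
        simp [pvCntStep, hc] at this ⊢
        omega

-- on a minimal balanced segment, is_correct ⟺ it starts with '('
theorem isCorrect_seg (w : List Char) (hne : w ≠ []) (hz : cnt w = 0)
    (hmin : ∀ q, q <+: w → q ≠ [] → q ≠ w → cnt q ≠ 0) :
    isCorrect w = (w.head? = some '(') := by
  rcases w with _ | ⟨c, t⟩
  · exact absurd rfl hne
  rcases eq_or_ne c '(' with rfl | hc
  · -- correct: run length = cnt = 0
    have hrun : ((isCorrectAux [] ('(' :: t)).length : Int) = 0 + cnt ('(' :: t) := by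
      apply run_len_eq
      intro q hq
      rcases q with _ | ⟨d, q'⟩
      · simp [cnt_nil]
      · obtain ⟨hd, hq'⟩ := List.cons_prefix_cons.mp hq
        subst hd
        rw [cnt_cons]
        have := prefix_nonneg t 1 (by omega) (by
          intro r hr hrne
          have := hmin ('(' :: r) (by simpa using hr) (by simp) (by simpa using hrne)
          rw [cnt_cons] at this
          simp [pvCntStep] at this ⊢
          omega) q' hq'
        simp [pvCntStep] at this ⊢
        omega
    rw [hz] at hrun
    have : isCorrectAux [] ('(' :: t) = [] := by
      rcases h : isCorrectAux [] ('(' :: t) with _ | _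
      · rfl
      · rw [h] at hrun; simp at hrun; omega
    simp [isCorrect, this]
  · -- starts with ')'-like char: final stack nonempty
    have hstep : pvCntStep c = -1 := by simp [pvCntStep, hc]
    have hrun : isCorrectAux [] (c :: t) = isCorrectAux [] t := by
      simp only [isCorrectAux]
      rw [if_neg hc]
    have hge := run_len_ge t []
    have hct : cnt t = 1 := by rw [cnt_cons] at hz; omega
    rw [hct] at hge
    simp only [List.length_nil, Nat.cast_zero, zero_add] at hge
    have : isCorrectAux [] t ≠ [] := by
      intro h
      rw [h] at hge; simp at hge
    simp [isCorrect, hrun, List.isEmpty_iff, this, hc]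

-- main lemma: A's recursion equals B's fold over the segment list
theorem convert_eq_fold : ∀ (p : List Char),
    convertList p = (segsAux 0 [] p).foldr (fun seg acc => segStep acc seg) [] := by
  intro p
  induction hL : p.length using Nat.strong_induction_on generalizing p with
  | _ n ih =>
  rcases eq_or_ne p [] with rfl | hne
  · simp [convertList, segsAux]
  · rw [convertList]
    rw [dif_neg hne]
    rcases segs_sep p 0 [] with ⟨hsep, hsegs⟩ | ⟨u, v, hsep, hune, hsegs⟩
    · have hsepa : separate p = ([], []) := hsep
      rw [hsegs]
      simp only [separate, hsep, List.foldr_nil]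
      have : isCorrect ([] : List Char) = true := by simp [isCorrect, isCorrectAux]
      rw [this]
      simp only [if_true]
      have hv : convertList [] = [] := by simp [convertList]
      simp [hv]
    · have hvlen : v.length < p.length := by
        have := sepAux_snd_lt p 0 [] hne
        rw [hsep] at this
        exact this
      have hIH : convertList v = (segsAux 0 [] v).foldr (fun seg acc => segStep acc seg) [] :=
        ih v.length (hL ▸ hvlen) v rfl
      obtain ⟨w, hw1, hw2, hw3, hw4⟩ := sepAux_shape p 0 [] u v hsep hune
      simp only [List.nil_append] at hw1
      subst hw1
      have hcorr : isCorrect u = (u.head? = some '(') := by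
        apply isCorrect_seg u hw2 (by omega)
        intro q hq h1 h2
        have := hw4 q hq h1 h2
        omega
      rw [hsegs]
      simp only [List.foldr_cons, separate, hsep]
      rw [hIH]
      simp only [segStep, hcorr]

-- ===== VERDICT (by name: the statement is the Claim_ definition above) =====
theorem convert_spec : Claim_equal_convert := by
  intro p _
  unfold Spec_convert convert convert_alt
  rw [convert_eq_fold, List.foldl_reverse]
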